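-- pv_equiv track=rewrite | github.com/thyjukki/hoi4-naval-battle-simulator | scritps/import_hoi4_ship_modules.py | parse_object_body
-- ===== SOURCE A (Python) =====
-- def parse_object_body(source: str, start_index: int) -> tuple[str, int]:
--     depth = 1
--     index = start_index
--
--     while index < len(source) and depth > 0:
--         character = source[index]
--
--         if character == "{":
--             depth += 1
--         elif character == "}":
--             depth -= 1
--
--         index += 1
--
--     return source[start_index : index - 1], index
-- ===== SOURCE B (Python) =====
-- def parse_object_body(source: str, start_index: int) -> tuple[str, int]:
--     if start_index >= len(source):
--         return source[start_index:start_index - 1], start_index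
--     depth = 1
--     index = start_index
--     while depth > 0:
--         next_close = source.find("}", index)
--         if next_close == -1:
--             index = len(source)
--             break
--         next_open = source.find("{", index)
--         if next_open != -1 and next_open < next_close:
--             depth += 1
--             index = next_open + 1
--         else:
--             depth -= 1
--             index = next_close + 1
--     return source[start_index:index - 1], index
-- ===== Notes on version B (the rewrite author's own statement) =====
-- stated objective: faster
-- what changed: B replaces A's character-by-character scan (examining every char and updating depth each step) by repeatedly jumping straight to the next brace with str.find and adjusting depth only at braces, with an early guard for start_index >= len(source).
-- outside the precondition, e.g. on parse_object_body('a{b}', -2): A returns ('b', 0), B returns ('b', 4)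
import Mathlib
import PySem

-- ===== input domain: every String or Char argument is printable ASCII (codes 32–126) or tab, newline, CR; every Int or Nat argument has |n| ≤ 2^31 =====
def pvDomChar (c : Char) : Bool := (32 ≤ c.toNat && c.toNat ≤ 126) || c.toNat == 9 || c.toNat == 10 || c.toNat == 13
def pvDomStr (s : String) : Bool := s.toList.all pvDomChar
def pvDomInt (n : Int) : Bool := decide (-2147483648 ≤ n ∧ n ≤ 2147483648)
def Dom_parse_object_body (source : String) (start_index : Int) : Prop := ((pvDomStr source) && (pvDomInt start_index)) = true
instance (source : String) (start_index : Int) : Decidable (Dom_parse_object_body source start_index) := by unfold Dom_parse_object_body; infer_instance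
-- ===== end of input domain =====

-- B replaces A's character-by-character scan by jumping from brace to brace with str.find (simpler
-- control flow, same return value); equivalence is proved for 0 ≤ start_index (Pre_ below).

-- ===== PORT A =====
-- A's while-loop as structural recursion on a fuel counter; the fuel ((len - start).toNat + 1)
-- is a totality device only and is never exhausted (index grows by 1 while index < len).
def pobLoopA (s : List Char) : Nat → Int → Int → Int
  | 0, index, _ => index
  | fuel + 1, index, depth =>
    if index < (s.length : Int) ∧ depth > 0 then
      -- character = source[index]; the IndexError case (index < -len) is excluded by Pre_
      let character := PySem.List.pyGetD s index ' '
      let depth' := if character = '{' then depth + 1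
                    else if character = '}' then depth - 1 else depth
      pobLoopA s fuel (index + 1) depth'
    else index

def parse_object_body (source : String) (start_index : Int) : String × Int :=
  let s := source.toList
  let index := pobLoopA s (((s.length : Int) - start_index).toNat + 1) start_index 1
  (PySem.Str.slice source (some start_index) (some (index - 1)), index)

-- ===== PORT B =====
-- Source B's find-driven loop, again total via a never-exhausted fuel counter (the loop index
-- strictly increases and stays ≤ len).  source.find(c, index) = PySem.Chars.findFrom on code points.
def pobLoopB (s : List Char) : Nat → Int → Int → Int
  | 0, index, _ => index
  | fuel + 1, index, depth =>
    if depth > 0 then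
      let next_close := PySem.Chars.findFrom s ['}'] index none
      if next_close = -1 then (s.length : Int)          -- index = len(source); break
      else
        let next_open := PySem.Chars.findFrom s ['{'] index none
        if next_open ≠ -1 ∧ next_open < next_close then pobLoopB s fuel (next_open + 1) (depth + 1)
        else pobLoopB s fuel (next_close + 1) (depth - 1)
    else index

def parse_object_body_alt (source : String) (start_index : Int) : String × Int :=
  if start_index ≥ PySem.Str.len source then
    (PySem.Str.slice source (some start_index) (some (start_index - 1)), start_index)
  else
    let index := pobLoopB source.toList ((PySem.Str.len source - start_index).toNat + 1) start_index 1
    (PySem.Str.slice source (some start_index) (some (index - 1)), index)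

-- ===== PRECONDITION & SPEC =====
-- Pre_ excludes negative start_index: there A raises IndexError once start_index < -len, and for
-- -len ≤ start_index < 0 A's value comes from Python's negative-index wraparound (the scan re-reads
-- the string from its head) — an accident of A's indexing that B's clamped find does not reproduce.
def Pre_parse_object_body (source : String) (start_index : Int) : Prop := 0 ≤ start_index
instance (source : String) (start_index : Int) : Decidable (Pre_parse_object_body source start_index) := by unfold Pre_parse_object_body; infer_instance
def pvWitness_parse_object_body : String × Int := ("a = { x = { 1 } } y", 5)

def Spec_parse_object_body (source : String) (start_index : Int) (out : String × Int) : Prop := out = parse_object_body_alt source start_index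
instance (source : String) (start_index : Int) (out : String × Int) : Decidable (Spec_parse_object_body source start_index out) := by unfold Spec_parse_object_body; infer_instance

-- ===== CLAIM (what is proved, stated in full; the proofs are below) =====
def Claim_equal_parse_object_body : Prop := ∀ (source : String) (start_index : Int), Dom_parse_object_body source start_index → Pre_parse_object_body source start_index → Spec_parse_object_body source start_index (parse_object_body source start_index)

-- ===== LEMMAS AND PROOFS =====

-- [c] is a prefix of l iff l starts with c.
theorem pob_single_prefix_iff (c : Char) (l : List Char) : [c] <+: l ↔ l[0]? = some c := by
  cases l with
  | nil => simp
  | cons x t => simp [List.cons_prefix_iff, eq_comm]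

-- find points at the stated first occurrence of the single character c.
theorem pob_find_single_first (s : List Char) (c : Char) (j : Nat)
    (hj : s[j]? = some c) (hmin : ∀ i, i < j → s[i]? ≠ some c) :
    PySem.Chars.find s [c] = (j : Int) := by
  have hinf : [c] <:+: s := by
    refine List.infix_iff_prefix_suffix.mpr ⟨s.drop j, ?_, List.drop_suffix j s⟩
    rw [pob_single_prefix_iff]
    simpa using hj
  have hge : 0 ≤ PySem.Chars.find s [c] := (PySem.Chars.find_nonneg_iff s [c]).mpr hinf
  obtain ⟨hpre, hminf⟩ := PySem.Chars.find_spec hge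
  rw [pob_single_prefix_iff] at hpre
  rw [List.getElem?_drop] at hpre
  simp only [Nat.add_zero] at hpre
  rcases lt_trichotomy (PySem.Chars.find s [c]).toNat j with h | h | h
  · exact absurd hpre (hmin _ h)
  · omega
  · exfalso
    exact hminf j h (by rw [pob_single_prefix_iff, List.getElem?_drop]; simpa using hj)

-- findFrom from k returns the first occurrence j ≥ k of c.
theorem pob_findFrom_single_eq (s : List Char) (c : Char) (k j : Nat)
    (hk : k ≤ s.length) (hkj : k ≤ j) (hc : s[j]? = some c)
    (hmin : ∀ i, k ≤ i → i < j → s[i]? ≠ some c) :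
    PySem.Chars.findFrom s [c] (k : Int) none = (j : Int) := by
  rw [PySem.Chars.findFrom_natCast s [c] k hk]
  have hfind : PySem.Chars.find (s.drop k) [c] = ((j - k : Nat) : Int) := by
    apply pob_find_single_first
    · rw [List.getElem?_drop]
      rw [show k + (j - k) = j by omega]
      exact hc
    · intro i hi
      rw [List.getElem?_drop]
      exact hmin (k + i) (by omega) (by omega)
  rw [hfind]
  have hne : ¬ (((j - k : Nat) : Int) = -1) := by omega
  rw [if_neg hne]
  omega

-- findFrom from k is -1 when c does not occur at any position ≥ k.
theorem pob_findFrom_single_none (s : List Char) (c : Char) (k : Nat)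
    (hk : k ≤ s.length) (h : ∀ i, k ≤ i → s[i]? ≠ some c) :
    PySem.Chars.findFrom s [c] (k : Int) none = -1 := by
  rw [PySem.Chars.findFrom_natCast s [c] k hk]
  have hfind : PySem.Chars.find (s.drop k) [c] = -1 := by
    rw [PySem.Chars.find_eq_neg_one_iff]
    intro hinf
    have hmem : c ∈ s.drop k := hinf.subset (List.mem_singleton_self c)
    obtain ⟨i, hi, hget⟩ := List.mem_iff_getElem.mp hmem
    have hsk : s[k + i]? = some c := by
      rw [← List.getElem?_drop]
      exact List.getElem?_eq_getElem hi ▸ congrArg some hget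
    exact h (k + i) (by omega) hsk
  rw [hfind]
  simp

-- findFrom at the character itself.
theorem pob_findFrom_self (s : List Char) (c : Char) (k : Nat)
    (hk : k < s.length) (hc : s[k]? = some c) :
    PySem.Chars.findFrom s [c] (k : Int) none = (k : Int) :=
  pob_findFrom_single_eq s c k k (le_of_lt hk) le_rfl hc (by omega)

-- findFrom skips a position holding a different character.
theorem pob_findFrom_succ (s : List Char) (c : Char) (k : Nat)
    (hk : k < s.length) (hc : s[k]? ≠ some c) :
    PySem.Chars.findFrom s [c] (k : Int) none = PySem.Chars.findFrom s [c] ((k + 1 : Nat) : Int) none := by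
  by_cases hex : ∃ j, (k + 1 ≤ j ∧ s[j]? = some c)
  · have hspec := Nat.find_spec hex
    have h1 : PySem.Chars.findFrom s [c] (k : Int) none = ((Nat.find hex : Nat) : Int) :=
      pob_findFrom_single_eq s c k (Nat.find hex) (le_of_lt hk) (by have := hspec.1; omega) hspec.2
        (by
          intro i hi hilt
          rcases Nat.eq_or_lt_of_le hi with h | h
          · rw [← h]; exact hc
          · intro hic
            exact Nat.find_min hex hilt ⟨h, hic⟩)
    have h2 : PySem.Chars.findFrom s [c] ((k + 1 : Nat) : Int) none = ((Nat.find hex : Nat) : Int) :=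
      pob_findFrom_single_eq s c (k + 1) (Nat.find hex) hk hspec.1 hspec.2
        (by intro i hi hilt hic; exact Nat.find_min hex hilt ⟨hi, hic⟩)
    rw [h1, h2]
  · have hex' : ∀ j, k + 1 ≤ j → s[j]? ≠ some c := by
      intro j hj hc'
      exact hex ⟨j, hj, hc'⟩
    rw [pob_findFrom_single_none s c k (le_of_lt hk)
      (by
        intro i hi
        rcases Nat.eq_or_lt_of_le hi with h | h
        · rw [← h]; exact hc
        · exact hex' i h),
      pob_findFrom_single_none s c (k + 1) hk (fun i hi => hex' i hi)]

-- a successful findFrom lands on c, at a position in [k, length).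
theorem pob_findFrom_spec (s : List Char) (c : Char) (k : Nat)
    (hk : k ≤ s.length) (h : PySem.Chars.findFrom s [c] (k : Int) none ≠ -1) :
    (k : Int) ≤ PySem.Chars.findFrom s [c] (k : Int) none ∧
    PySem.Chars.findFrom s [c] (k : Int) none < (s.length : Int) ∧
    s[(PySem.Chars.findFrom s [c] (k : Int) none).toNat]? = some c := by
  obtain ⟨hle, hpre, _⟩ := PySem.Chars.findFrom_natCast_spec s [c] k hk h
  rw [pob_single_prefix_iff, List.getElem?_drop, Nat.add_zero] at hpre
  have hlt : (PySem.Chars.findFrom s [c] (k : Int) none).toNat < s.length := by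
    rcases List.getElem?_eq_some_iff.mp hpre with ⟨hh, _⟩
    exact hh
  exact ⟨hle, by omega, hpre⟩

-- With no '}' at or after position k, A's loop runs to the end of the string.
theorem pob_loopA_noClose (s : List Char) : ∀ (fuel : Nat) (k : Nat) (d : Int),
    k ≤ s.length → s.length - k < fuel → 0 < d →
    PySem.Chars.findFrom s ['}'] (k : Int) none = -1 →
    pobLoopA s fuel (k : Int) d = (s.length : Int) := by
  intro fuel
  induction fuel with
  | zero => intro k d hk hf hd hno; omega
  | succ f ih =>
    intro k d hk hf hd hno
    by_cases hkn : k < s.length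
    · have hne : s[k]? ≠ some '}' := by
        intro hcq
        rw [pob_findFrom_self s '}' k hkn hcq] at hno
        omega
      have hne' : s[k] ≠ '}' := by
        intro hq; exact hne (by rw [List.getElem?_eq_getElem hkn, hq])
      have hchar : PySem.List.pyGetD s (k : Int) ' ' = s[k] := by
        rw [PySem.List.pyGetD_natCast, List.getD_eq_getElem s ' ' hkn]
      have hcast : (k : Int) + 1 = ((k + 1 : Nat) : Int) := by push_cast; ring
      have hno' : PySem.Chars.findFrom s ['}'] ((k + 1 : Nat) : Int) none = -1 := by
        rw [← pob_findFrom_succ s '}' k hkn hne]; exact hno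
      simp only [pobLoopA]
      rw [if_pos ⟨by exact_mod_cast hkn, hd⟩, hchar, hcast]
      by_cases hbr : s[k] = '{'
      · rw [if_pos hbr]
        exact ih (k + 1) (d + 1) (by omega) (by omega) (by omega) hno'
      · rw [if_neg hbr, if_neg hne']
        exact ih (k + 1) d (by omega) (by omega) hd hno'
    · have hkeq : k = s.length := by omega
      subst hkeq
      simp only [pobLoopA]
      rw [if_neg (by simp)]

-- B's loop is insensitive to the exact (sufficient) fuel.
theorem pob_loopB_irrel (s : List Char) : ∀ (f1 f2 : Nat) (k : Nat) (d : Int),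
    k ≤ s.length → s.length - k < f1 → s.length - k < f2 →
    pobLoopB s f1 (k : Int) d = pobLoopB s f2 (k : Int) d := by
  intro f1
  induction f1 with
  | zero => intro f2 k d hk h1 h2; omega
  | succ g1 ih =>
    intro f2 k d hk h1 h2
    obtain ⟨g2, rfl⟩ : ∃ g2, f2 = g2 + 1 := ⟨f2 - 1, by omega⟩
    simp only [pobLoopB]
    by_cases hd : d > 0
    · rw [if_pos hd, if_pos hd]
      by_cases hnc : PySem.Chars.findFrom s ['}'] (k : Int) none = -1
      · rw [if_pos hnc, if_pos hnc]
      · rw [if_neg hnc, if_neg hnc]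
        obtain ⟨hkle, hlt, hat⟩ := pob_findFrom_spec s '}' k hk hnc
        by_cases hcond : (PySem.Chars.findFrom s ['{'] (k : Int) none ≠ -1 ∧
            PySem.Chars.findFrom s ['{'] (k : Int) none < PySem.Chars.findFrom s ['}'] (k : Int) none)
        · rw [if_pos hcond, if_pos hcond]
          obtain ⟨hkleo, hlto, hato⟩ := pob_findFrom_spec s '{' k hk hcond.1
          have hcast : PySem.Chars.findFrom s ['{'] (k : Int) none + 1 =
              (((PySem.Chars.findFrom s ['{'] (k : Int) none).toNat + 1 : Nat) : Int) := by omega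
          rw [hcast]
          exact ih (g2) _ (d + 1) (by omega) (by omega) (by omega)
        · rw [if_neg hcond, if_neg hcond]
          have hcast : PySem.Chars.findFrom s ['}'] (k : Int) none + 1 =
              (((PySem.Chars.findFrom s ['}'] (k : Int) none).toNat + 1 : Nat) : Int) := by omega
          rw [hcast]
          exact ih (g2) _ (d - 1) (by omega) (by omega) (by omega)
    · rw [if_neg hd, if_neg hd]

-- Main invariant: from any common state, A's scan and B's brace-jumping agree.
theorem pob_loops_agree (s : List Char) : ∀ (fuel : Nat) (k : Nat) (d : Int),
    k ≤ s.length → s.length - k < fuel →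
    pobLoopA s fuel (k : Int) d = pobLoopB s fuel (k : Int) d := by
  intro fuel
  induction fuel with
  | zero => intro k d hk hf; omega
  | succ g ih =>
    intro k d hk hf
    by_cases hd : d > 0
    · by_cases hkn : k < s.length
      · have hchar : PySem.List.pyGetD s (k : Int) ' ' = s[k] := by
          rw [PySem.List.pyGetD_natCast, List.getD_eq_getElem s ' ' hkn]
        have hcast : (k : Int) + 1 = ((k + 1 : Nat) : Int) := by push_cast; ring
        by_cases hopen : s[k] = '{'
        · -- opening brace
          have hself : PySem.Chars.findFrom s ['{'] (k : Int) none = (k : Int) :=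
            pob_findFrom_self s '{' k hkn (by rw [List.getElem?_eq_getElem hkn, hopen])
          have hneopen : s[k] ≠ '}' := by rw [hopen]; decide
          simp only [pobLoopA, pobLoopB]
          rw [if_pos ⟨by exact_mod_cast hkn, hd⟩, if_pos hd, hchar, if_pos hopen, hcast]
          by_cases hnc : PySem.Chars.findFrom s ['}'] (k : Int) none = -1
          · rw [if_pos hnc]
            have hno' : PySem.Chars.findFrom s ['}'] ((k + 1 : Nat) : Int) none = -1 := by
              rw [← pob_findFrom_succ s '}' k hkn
                (by rw [List.getElem?_eq_getElem hkn, hopen]; simp)]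
              exact hnc
            exact pob_loopA_noClose s g (k + 1) (d + 1) (by omega) (by omega) (by omega) hno'
          · rw [if_neg hnc]
            obtain ⟨hkle, hlt, hat⟩ := pob_findFrom_spec s '}' k hk hnc
            have hnek : PySem.Chars.findFrom s ['}'] (k : Int) none ≠ (k : Int) := by
              intro hq
              rw [hq] at hat
              simp only [Int.toNat_natCast] at hat
              rw [List.getElem?_eq_getElem hkn, hopen] at hat
              exact absurd (Option.some.inj hat) (by decide)
            rw [if_pos ⟨by rw [hself]; omega, by rw [hself]; omega⟩, hself, hcast]
            exact ih (k + 1) (d + 1) (by omega) (by omega)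
        · by_cases hclose : s[k] = '}'
          · -- closing brace
            have hself : PySem.Chars.findFrom s ['}'] (k : Int) none = (k : Int) :=
              pob_findFrom_self s '}' k hkn (by rw [List.getElem?_eq_getElem hkn, hclose])
            simp only [pobLoopA, pobLoopB]
            rw [if_pos ⟨by exact_mod_cast hkn, hd⟩, if_pos hd, hchar, if_neg hopen, if_pos hclose,
              hself, if_neg (by omega : ¬ ((k : Int) = -1))]
            have hcond : ¬ (PySem.Chars.findFrom s ['{'] (k : Int) none ≠ -1 ∧
                PySem.Chars.findFrom s ['{'] (k : Int) none < (k : Int)) := by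
              rintro ⟨hne1, hlt1⟩
              obtain ⟨hkleo, _, _⟩ := pob_findFrom_spec s '{' k hk hne1
              omega
            rw [if_neg hcond, hcast]
            exact ih (k + 1) (d - 1) (by omega) (by omega)
          · -- ordinary character: B does not move, A steps over it
            have hq1 : s[k]? ≠ some '{' := by
              rw [List.getElem?_eq_getElem hkn]; intro hq; exact hopen (Option.some.inj hq)
            have hq2 : s[k]? ≠ some '}' := by
              rw [List.getElem?_eq_getElem hkn]; intro hq; exact hclose (Option.some.inj hq)
            have hskip : pobLoopB s (g + 1) (k : Int) d = pobLoopB s (g + 1) ((k + 1 : Nat) : Int) d := by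
              conv_lhs => rw [pobLoopB]
              conv_rhs => rw [pobLoopB]
              rw [pob_findFrom_succ s '}' k hkn hq2, pob_findFrom_succ s '{' k hkn hq1]
              rw [if_pos hd, if_pos hd]
            rw [hskip]
            simp only [pobLoopA]
            rw [if_pos ⟨by exact_mod_cast hkn, hd⟩, hchar, if_neg hopen, if_neg hclose, hcast]
            rw [ih (k + 1) d (by omega) (by omega)]
            exact pob_loopB_irrel s g (g + 1) (k + 1) d (by omega) (by omega) (by omega)
      · -- k = length
        have hkeq : k = s.length := by omega
        subst hkeq
        have hnone : PySem.Chars.findFrom s ['}'] ((s.length : Nat) : Int) none = -1 :=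
          pob_findFrom_single_none s '}' s.length le_rfl
            (by intro i hi; rw [List.getElem?_eq_none hi]; simp)
        simp only [pobLoopA, pobLoopB]
        rw [if_neg (by simp), if_pos hd, if_pos hnone]
    · simp only [pobLoopA, pobLoopB]
      rw [if_neg (by tauto), if_neg hd]

-- ===== VERDICT (by name: the statement is the Claim_ definition above) =====
theorem parse_object_body_spec : Claim_equal_parse_object_body := by
  unfold Claim_equal_parse_object_body
  intro source start hdom hpre
  unfold Pre_parse_object_body at hpre
  unfold Spec_parse_object_body
  simp only [parse_object_body, parse_object_body_alt, PySem.Str.len_eq]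
  by_cases hge : ((source.toList.length : Nat) : Int) ≤ start
  · rw [if_pos hge]
    simp only [pobLoopA]
    rw [if_neg (by omega)]
  · rw [if_neg hge]
    have hkc : ((start.toNat : Nat) : Int) = start := by omega
    rw [← hkc]
    rw [pob_loops_agree source.toList _ start.toNat 1 (by omega) (by omega)]
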